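-- pv_equiv track=rewrite | github.com/s3891667/Mycrypt | test.py | solving
-- ===== SOURCE A (Python) =====
-- def solving(array):
--     newArray = []
--     for num in array:
--         if(abs(num) in newArray):
--             continue
--         else:
--             newArray.append(abs(num))
--     j = 0
--     while j < len(newArray)-1:
--         if (newArray[j] > newArray[j + 1]):
--             temp = newArray[j]
--             newArray[j] = newArray[j + 1]
--             newArray[j + 1] = temp
--             j = -1
--         j += 1
--     return newArray
-- ===== SOURCE B (Python) =====
-- def solving(array):
--     vals = sorted(abs(num) for num in array)
--     out = []
--     for v in vals:
--         if not out or v != out[-1]: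
--             out.append(v)
--     return out
-- ===== Notes on version B (the rewrite author's own statement) =====
-- stated objective: faster
-- what changed: A dedups with a linear membership scan per element and then sorts with a restart-at-zero bubble sort; B sorts the absolute values once and removes adjacent duplicates in a single linear pass against the last kept element.
import Mathlib
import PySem

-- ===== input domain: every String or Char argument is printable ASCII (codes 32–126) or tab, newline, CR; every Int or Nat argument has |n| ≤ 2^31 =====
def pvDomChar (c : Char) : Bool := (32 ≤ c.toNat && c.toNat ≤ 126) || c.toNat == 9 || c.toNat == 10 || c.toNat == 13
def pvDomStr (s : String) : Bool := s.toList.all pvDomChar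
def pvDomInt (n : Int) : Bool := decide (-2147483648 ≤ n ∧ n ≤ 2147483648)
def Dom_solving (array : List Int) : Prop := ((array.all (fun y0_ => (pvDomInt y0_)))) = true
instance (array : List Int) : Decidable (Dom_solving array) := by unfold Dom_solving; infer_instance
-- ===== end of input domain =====

-- B replaces A's membership-scan dedup followed by a restart-at-zero bubble sort with one
-- sort of the absolute values followed by a single adjacent-duplicate-removal pass (objective: faster).

-- ===== PORT A =====
-- Termination measure for A's while loop: number of inversions of the list
-- (it strictly drops on every swap; cited by name in `decreasing_by`).
def pvInv : List Int → Nat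
  | [] => 0
  | x :: xs => xs.countP (fun z => decide (z < x)) + pvInv xs

theorem pvInv_append (a l : List Int) :
    pvInv (a ++ l) = pvInv a + (a.map (fun t => l.countP (fun z => decide (z < t)))).sum + pvInv l := by
  induction a with
  | nil => simp [pvInv]
  | cons x xs ih => simp [pvInv, List.countP_append, ih]; ring

theorem pvInv_swap (p b : List Int) (x y : Int) (h : y < x) :
    pvInv (p ++ y :: x :: b) < pvInv (p ++ x :: y :: b) := by
  have hperm : (y :: x :: b).Perm (x :: y :: b) := List.Perm.swap x y b
  have hc : ∀ t : Int, (y :: x :: b).countP (fun z => decide (z < t))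
      = (x :: y :: b).countP (fun z => decide (z < t)) := fun t => hperm.countP_eq _
  rw [pvInv_append, pvInv_append]
  simp only [hc]
  have h1 : pvInv (y :: x :: b) < pvInv (x :: y :: b) := by
    simp only [pvInv, List.countP_cons]
    have hx : ¬ (x < y) := not_lt.mpr h.le
    simp [h, hx]
    omega
  omega

-- the adjacent swap written out as take/cons/cons/drop (used for termination and the proofs)
theorem pvSetSet_adj (p b : List Int) (x y : Int) :
    ((p ++ x :: y :: b).set p.length y).set (p.length + 1) x = p ++ y :: x :: b := by
  induction p with
  | nil => simp [List.set]
  | cons a p ih => simpa [List.set] using ih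

theorem pvDecompose (l : List Int) (j : Nat) (h : j + 1 < l.length) :
    l = l.take j ++ (l[j]'(by omega)) :: (l[j + 1]'h) :: l.drop (j + 2) := by
  conv_lhs => rw [← List.take_append_drop j l]
  congr 1
  rw [List.drop_eq_getElem_cons (by omega : j < l.length)]
  congr 1
  rw [List.drop_eq_getElem_cons (by omega : j + 1 < l.length)]

theorem pvSetSet_adj' (p b : List Int) (x y : Int) (n : Nat) (hn : n = p.length) :
    ((p ++ x :: y :: b).set n y).set (n + 1) x = p ++ y :: x :: b := by
  subst hn; exact pvSetSet_adj p b x y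

theorem pvSwap_eq (l : List Int) (j : Nat) (h : j + 1 < l.length) :
    (l.set j (l[j + 1]'h)).set (j + 1) (l[j]'(by omega))
      = l.take j ++ (l[j + 1]'h) :: (l[j]'(by omega)) :: l.drop (j + 2) := by
  have hp : (l.take j).length = j := by simp; omega
  obtain ⟨x, hx⟩ : ∃ x, l[j]'(by omega : j < l.length) = x := ⟨_, rfl⟩
  obtain ⟨y, hy⟩ : ∃ y, l[j + 1]'h = y := ⟨_, rfl⟩
  rw [hx, hy]
  conv_lhs => rw [pvDecompose l j h]
  rw [hx, hy]
  exact pvSetSet_adj' (l.take j) (l.drop (j + 2)) x y j hp.symm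

theorem pvSwap_inv_lt (l : List Int) (j : Nat) (h : j + 1 < l.length)
    (hxy : (l[j + 1]'h) < l[j]'(by omega)) :
    pvInv ((l.set j (l[j + 1]'h)).set (j + 1) (l[j]'(by omega))) < pvInv l := by
  rw [pvSwap_eq l j h]
  conv_rhs => rw [pvDecompose l j h]
  exact pvInv_swap _ _ _ _ hxy

-- A's while loop: 'j = -1; j += 1' at a swap restarts the scan at index 0.
def bubbleLoop (l : List Int) (j : Nat) : List Int :=
  if h : j + 1 < l.length then
    if hxy : (l[j + 1]'h) < l[j]'(by omega) then
      -- temp = l[j]; l[j] = l[j+1]; l[j+1] = temp; j = -1; j += 1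
      bubbleLoop ((l.set j (l[j + 1]'h)).set (j + 1) (l[j]'(by omega))) 0
    else
      bubbleLoop l (j + 1)
  else l
termination_by (pvInv l, l.length - j)
decreasing_by
  · exact Prod.Lex.left _ _ (pvSwap_inv_lt l j h hxy)
  · have : l.length - (j + 1) < l.length - j := by omega
    exact Prod.Lex.right _ this

def solving (array : List Int) : List Int :=
  let newArray := array.foldl (fun acc num => if |num| ∈ acc then acc else acc ++ [|num|]) []
  bubbleLoop newArray 0

-- ===== PORT B =====
def solving_alt (array : List Int) : List Int :=
  let vals := PySem.List.sorted (array.map (fun num => |num|)) (fun x => x) false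
  vals.foldl
    (fun out v => if out = [] ∨ PySem.List.pyGet? out (-1) ≠ some v then out ++ [v] else out) []

-- ===== PRECONDITION & SPEC =====
def Spec_solving (array : List Int) (out : List Int) : Prop := out = solving_alt array
instance (array : List Int) (out : List Int) : Decidable (Spec_solving array out) := by unfold Spec_solving; infer_instance

-- ===== CLAIM (what is proved, stated in full; the proofs are below) =====
def Claim_equal_solving : Prop := ∀ (array : List Int), Dom_solving array → Spec_solving array (solving array)

-- ===== LEMMAS AND PROOFS =====

theorem bubbleLoop_perm (l : List Int) (j : Nat) : (bubbleLoop l j).Perm l := by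
  fun_induction bubbleLoop l j with
  | case1 l j h hxy ih =>
      refine ih.trans ?_
      rw [pvSwap_eq l j h]
      conv_rhs => rw [pvDecompose l j h]
      exact (List.Perm.swap _ _ _).append_left _
  | case2 l j h hxy ih => exact ih
  | case3 l j h => exact List.Perm.refl l

theorem bubbleLoop_sorted (l : List Int) (j : Nat) :
    (∀ i : Nat, i < j → ∀ (_ : i + 1 < l.length), l[i] ≤ l[i + 1]) →
    (bubbleLoop l j).Pairwise (· ≤ ·) := by
  fun_induction bubbleLoop l j with
  | case1 l j h hxy ih =>
      intro _
      exact ih (fun i hi _ => absurd hi (Nat.not_lt_zero i))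
  | case2 l j h hxy ih =>
      intro hinv
      apply ih
      intro i hij hi1
      rcases Nat.lt_or_ge i j with hij' | hij'
      · exact hinv i hij' hi1
      · have hij : i = j := by omega
        subst hij
        exact not_lt.mp hxy
  | case3 l j h =>
      intro hinv
      rw [← List.isChain_iff_pairwise, List.isChain_iff_getElem]
      intro i hi
      exact hinv i (by omega) hi

theorem dedup_spec (array : List Int) (acc : List Int) (hacc : acc.Nodup) :
    (array.foldl (fun acc num => if |num| ∈ acc then acc else acc ++ [|num|]) acc).Nodup ∧
    (∀ x, x ∈ array.foldl (fun acc num => if |num| ∈ acc then acc else acc ++ [|num|]) acc ↔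
      x ∈ acc ∨ x ∈ array.map (fun n => |n|)) := by
  induction array generalizing acc with
  | nil => simpa using hacc
  | cons n t ih =>
      simp only [List.foldl_cons]
      by_cases hmem : |n| ∈ acc
      · simp only [if_pos hmem]
        obtain ⟨h1, h2⟩ := ih acc hacc
        refine ⟨h1, fun x => (h2 x).trans ?_⟩
        simp only [List.map_cons, List.mem_cons]
        constructor
        · rintro (hx | hx)
          · exact Or.inl hx
          · exact Or.inr (Or.inr hx)
        · rintro (hx | hx | hx)
          · exact Or.inl hx
          · exact Or.inl (hx ▸ hmem)
          · exact Or.inr hx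
      · simp only [if_neg hmem]
        have hacc' : (acc ++ [|n|]).Nodup := by
          rw [List.nodup_append]
          refine ⟨hacc, List.nodup_singleton _, ?_⟩
          intro a ha b hb
          rw [List.mem_singleton] at hb
          exact fun he => hmem ((he.trans hb) ▸ ha)
        obtain ⟨h1, h2⟩ := ih (acc ++ [|n|]) hacc'
        refine ⟨h1, fun x => (h2 x).trans ?_⟩
        simp only [List.mem_append, List.map_cons, List.mem_cons]
        tauto

theorem le_of_mem_getLast (acc : List Int) (h : acc.Pairwise (· < ·)) (a : Int) (ha : a ∈ acc)
    (b : Int) (hb : acc.getLast? = some b) : a ≤ b := by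
  induction acc with
  | nil => cases ha
  | cons c t ih =>
      cases t with
      | nil =>
          simp only [List.mem_singleton] at ha
          simp only [List.getLast?_singleton, Option.some.injEq] at hb
          omega
      | cons d t' =>
          rw [List.getLast?_cons_cons] at hb
          have hpt : (d :: t').Pairwise (· < ·) := (List.pairwise_cons.mp h).2
          rcases List.mem_cons.mp ha with rfl | hat
          · have hbmem : b ∈ d :: t' := List.mem_of_getLast? hb
            exact le_of_lt ((List.pairwise_cons.mp h).1 b hbmem)
          · exact ih hpt hat hb

theorem dedupAdj_spec (vals acc : List Int)
    (hacc : acc.Pairwise (· < ·))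
    (hvals : vals.Pairwise (· ≤ ·))
    (hle : ∀ a ∈ acc, ∀ v ∈ vals, a ≤ v) :
    (vals.foldl (fun out v =>
        if out = [] ∨ PySem.List.pyGet? out (-1) ≠ some v then out ++ [v] else out) acc).Pairwise (· < ·) ∧
    (∀ x, x ∈ vals.foldl (fun out v =>
        if out = [] ∨ PySem.List.pyGet? out (-1) ≠ some v then out ++ [v] else out) acc ↔
      x ∈ acc ∨ x ∈ vals) := by
  induction vals generalizing acc with
  | nil => simp [hacc]
  | cons v vs ih =>
      simp only [List.foldl_cons]
      have hvhead : ∀ w ∈ vs, v ≤ w := (List.pairwise_cons.mp hvals).1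
      have hvst : vs.Pairwise (· ≤ ·) := (List.pairwise_cons.mp hvals).2
      by_cases hemp : acc = []
      · subst hemp
        rw [if_pos (Or.inl rfl)]
        obtain ⟨h1, h2⟩ := ih ([] ++ [v]) (by simp) hvst
          (by
            intro a ha w hw
            simp only [List.nil_append, List.mem_singleton] at ha
            exact ha ▸ hvhead w hw)
        refine ⟨h1, fun x => (h2 x).trans ?_⟩
        simp
      · obtain ⟨b, hb⟩ : ∃ b, acc.getLast? = some b := by
          cases hacc' : acc.getLast? with
          | none => exact absurd (List.getLast?_eq_none_iff.mp hacc') hemp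
          | some b => exact ⟨b, rfl⟩
        have hbmem : b ∈ acc := List.mem_of_getLast? hb
        have hbv : b ≤ v := hle b hbmem v (List.mem_cons_self)
        by_cases hbe : b = v
        · rw [if_neg (by simp [hemp, PySem.List.pyGet?_neg_one, hb, hbe])]
          obtain ⟨h1, h2⟩ := ih acc hacc hvst
            (fun a ha w hw => hle a ha w (List.mem_cons_of_mem v hw))
          refine ⟨h1, fun x => (h2 x).trans ?_⟩
          simp only [List.mem_cons]
          constructor
          · rintro (hx | hx)
            · exact Or.inl hx
            · exact Or.inr (Or.inr hx)
          · rintro (hx | hx | hx)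
            · exact Or.inl hx
            · exact Or.inl (by rw [hx, ← hbe]; exact hbmem)
            · exact Or.inr hx
        · rw [if_pos (Or.inr (by simp [PySem.List.pyGet?_neg_one, hb, hbe]))]
          have hlt : ∀ a ∈ acc, a < v := by
            intro a ha
            have h1 : a ≤ b := le_of_mem_getLast acc hacc a ha b hb
            have h2 : b < v := lt_of_le_of_ne hbv hbe
            omega
          obtain ⟨h1, h2⟩ := ih (acc ++ [v])
            (by
              rw [List.pairwise_append]
              exact ⟨hacc, List.pairwise_singleton _ _, by simpa using hlt⟩)
            hvst
            (by
              intro a ha w hw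
              rcases List.mem_append.mp ha with ha' | ha'
              · exact hle a ha' w (List.mem_cons_of_mem v hw)
              · simp only [List.mem_singleton] at ha'
                exact ha' ▸ hvhead w hw)
          refine ⟨h1, fun x => (h2 x).trans ?_⟩
          simp only [List.mem_append, List.mem_cons]
          tauto

-- ===== VERDICT (by name: the statement is the Claim_ definition above) =====
theorem solving_spec : Claim_equal_solving := by
  intro array _
  unfold Spec_solving solving solving_alt
  simp only []
  set d := array.foldl (fun acc num => if |num| ∈ acc then acc else acc ++ [|num|]) [] with hd
  set vals := PySem.List.sorted (array.map (fun num => |num|)) (fun x => x) false with hv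
  obtain ⟨hdnodup, hdmem⟩ := dedup_spec array [] List.nodup_nil
  rw [← hd] at hdnodup hdmem
  obtain ⟨hBpair, hBmem⟩ := dedupAdj_spec vals [] (List.Pairwise.nil) 
    (by simpa using PySem.List.sorted_pairwise (array.map (fun num => |num|)) (fun x => x))
    (by simp)
  have hperm : (bubbleLoop d 0).Perm d := bubbleLoop_perm d 0
  have hAsorted : (bubbleLoop d 0).Pairwise (· ≤ ·) :=
    bubbleLoop_sorted d 0 (fun i hi _ => absurd hi (Nat.not_lt_zero i))
  have hAnodup : (bubbleLoop d 0).Nodup := hperm.nodup_iff.mpr hdnodup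
  have hBnodup : (vals.foldl (fun out v =>
      if out = [] ∨ PySem.List.pyGet? out (-1) ≠ some v then out ++ [v] else out) []).Nodup :=
    hBpair.imp (fun hab => ne_of_lt hab)
  have hBsorted := hBpair.imp (fun {a b} hab => le_of_lt hab)
  have hmem : ∀ x, x ∈ bubbleLoop d 0 ↔ x ∈ vals.foldl (fun out v =>
      if out = [] ∨ PySem.List.pyGet? out (-1) ≠ some v then out ++ [v] else out) [] := by
    intro x
    rw [hperm.mem_iff, hdmem x, hBmem x, hv, PySem.List.mem_sorted]
  have hperm2 : (bubbleLoop d 0).Perm (vals.foldl (fun out v =>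
      if out = [] ∨ PySem.List.pyGet? out (-1) ≠ some v then out ++ [v] else out) []) :=
    List.perm_of_nodup_nodup_toFinset_eq hAnodup hBnodup
      (Finset.ext fun x => by simpa [List.mem_toFinset] using hmem x)
  exact List.Perm.eq_of_pairwise (fun a b _ _ hab hba => le_antisymm hab hba)
    hAsorted hBsorted hperm2
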